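-- pv_equiv track=rewrite | github.com/Lvjianqiang-hust/DopSteg | Search/graph-process-python/main.py | reverse_build_graph
-- ===== SOURCE A (Python) =====
-- def reverse_build_graph(raw_mp, start, end):
--     # 逆向建图，从end到start
--     reverse_graph_mp = {}
--     visited = set()
--     queue = [end]
--     while queue:
--         node = queue.pop(0)
--         if node in visited:
--             continue
--         visited.add(node)
--         if node in raw_mp:
--             for n in raw_mp[node]:
--                 if node in reverse_graph_mp:
--                     reverse_graph_mp[node].append(n)
--                 else:
--                     reverse_graph_mp[node] = [n]
--                 queue.append(n)
--     return reverse_graph_mp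
-- ===== SOURCE B (Python) =====
-- def reverse_build_graph(raw_mp, start, end):
--     # Level-synchronous recursion instead of A's FIFO-queue loop with inline dict
--     # building: each call consumes one whole frontier level, collecting newly
--     # discovered keys and the next level, then recurses; the result dict is
--     # assembled afterwards from the discovery-ordered key list.
--     def levels(frontier, seen):
--         keys = []
--         nxt = []
--         for node in frontier:
--             if node in seen:
--                 continue
--             seen.add(node)
--             ns = raw_mp.get(node)
--             if ns:
--                 keys.append(node)
--                 nxt.extend(ns)
--         if nxt:
--             keys.extend(levels(nxt, seen))
--         return keys
--     order = levels([end], set())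
--     return {node: list(raw_mp[node]) for node in order}
-- ===== Notes on version B (the rewrite author's own statement) =====
-- stated objective: alternative
-- what changed: A's single FIFO-queue BFS loop that pops the queue front and builds the dict inline with per-neighbor append-or-create branching is replaced by a recursive level-synchronous traversal (each call folds over one whole frontier level, collecting the new keys and the concatenated next level, then recurses) followed by a separate dict-building pass over the discovery-ordered keys.
import Mathlib
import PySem

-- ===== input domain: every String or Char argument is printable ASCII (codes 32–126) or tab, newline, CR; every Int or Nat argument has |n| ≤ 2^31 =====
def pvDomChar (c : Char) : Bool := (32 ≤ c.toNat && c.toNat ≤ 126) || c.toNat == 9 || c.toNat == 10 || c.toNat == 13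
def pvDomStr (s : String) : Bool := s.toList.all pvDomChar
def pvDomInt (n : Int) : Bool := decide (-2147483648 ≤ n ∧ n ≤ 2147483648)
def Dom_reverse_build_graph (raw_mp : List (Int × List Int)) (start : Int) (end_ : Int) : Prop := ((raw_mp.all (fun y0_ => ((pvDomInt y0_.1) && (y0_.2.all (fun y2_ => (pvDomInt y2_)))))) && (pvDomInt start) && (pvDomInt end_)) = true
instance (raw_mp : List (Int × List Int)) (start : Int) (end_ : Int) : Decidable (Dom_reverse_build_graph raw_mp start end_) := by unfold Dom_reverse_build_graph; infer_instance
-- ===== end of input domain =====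

-- B replaces A's FIFO-queue BFS loop with inline dict building by a recursive
-- level-synchronous traversal (one fold per frontier level collecting keys and the
-- next level) followed by a separate dict-building pass (alternative decomposition).

-- fuel bound shared by both loops: total length of all neighbour lists plus one
-- (A dequeues at most that many elements; B recurses at most that many levels)
def pvFuel (raw_mp : List (Int × List Int)) : Nat :=
  raw_mp.foldl (fun a p => a + p.2.length) 0 + 1

-- ===== PORT A =====
-- body of A's `for n in raw_mp[node]` loop: per-neighbour dict append-or-create plus queue.append
def stepA (node : Int) (st : PySem.Dict Int (List Int) × List Int) (n : Int) :
    PySem.Dict Int (List Int) × List Int :=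
  ((if st.1.contains node then st.1.modify node [] (· ++ [n])
    else st.1.insert node [n]),
   st.2 ++ [n])

-- A's `while queue:` loop; fuel only makes the recursion structural (never exhausted, see pvFuel)
def revLoopA (raw_mp : List (Int × List Int)) :
    Nat → PySem.Set Int → List Int → PySem.Dict Int (List Int) → PySem.Dict Int (List Int)
  | 0, _, _, d => d
  | _ + 1, _, [], d => d
  | fuel + 1, visited, node :: rest, d =>      -- node = queue.pop(0)
    if PySem.Set.contains visited node then revLoopA raw_mp fuel visited rest d
    else
      let visited' := PySem.Set.add visited node
      match (PySem.Dict.mk raw_mp).get? node with   -- `if node in raw_mp:` + `raw_mp[node]`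
      | none => revLoopA raw_mp fuel visited' rest d
      | some ns =>
        let st := ns.foldl (stepA node) (d, rest)
        revLoopA raw_mp fuel visited' st.2 st.1

def reverse_build_graph (raw_mp : List (Int × List Int)) (start : Int) (end_ : Int) :
    List (Int × List Int) :=
  (revLoopA raw_mp (pvFuel raw_mp) PySem.Set.empty [end_] PySem.Dict.empty).items

-- ===== PORT B =====
-- body of B's `for node in frontier` loop: state = (seen, keys, nxt)
def stepB (raw_mp : List (Int × List Int))
    (st : PySem.Set Int × List Int × List Int) (node : Int) :
    PySem.Set Int × List Int × List Int :=
  if PySem.Set.contains st.1 node then st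
  else
    let seen' := PySem.Set.add st.1 node
    match (PySem.Dict.mk raw_mp).get? node with      -- ns = raw_mp.get(node)
    | some (n :: ns) =>                              -- `if ns:` (non-None and non-empty)
      (seen', st.2.1 ++ [node], st.2.2 ++ (n :: ns))
    | _ => (seen', st.2.1, st.2.2)

-- B's recursive `levels(frontier, seen)`; fuel only makes it structural (never exhausted)
def levelsB (raw_mp : List (Int × List Int)) : Nat → List Int → PySem.Set Int → List Int
  | 0, _, _ => []
  | fuel + 1, frontier, seen =>
    let st := frontier.foldl (stepB raw_mp) (seen, [], [])
    if st.2.2 = [] then st.2.1 else st.2.1 ++ levelsB raw_mp fuel st.2.2 st.1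

-- `{node: list(raw_mp[node]) for node in order}` (every key is in raw_mp, default unused)
def pvPairs (raw_mp : List (Int × List Int)) (keys : List Int) : List (Int × List Int) :=
  keys.map (fun node => (node, ((PySem.Dict.mk raw_mp).get? node).getD []))

def reverse_build_graph_alt (raw_mp : List (Int × List Int)) (start : Int) (end_ : Int) :
    List (Int × List Int) :=
  pvPairs raw_mp (levelsB raw_mp (pvFuel raw_mp) [end_] PySem.Set.empty)

-- ===== PRECONDITION & SPEC =====
def Spec_reverse_build_graph (raw_mp : List (Int × List Int)) (start : Int) (end_ : Int) (out : List (Int × List Int)) : Prop := out = reverse_build_graph_alt raw_mp start end_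
instance (raw_mp : List (Int × List Int)) (start : Int) (end_ : Int) (out : List (Int × List Int)) : Decidable (Spec_reverse_build_graph raw_mp start end_ out) := by unfold Spec_reverse_build_graph; infer_instance

-- ===== CLAIM (what is proved, stated in full; the proofs are below) =====
def Claim_equal_reverse_build_graph : Prop := ∀ (raw_mp : List (Int × List Int)) (start : Int) (end_ : Int), Dom_reverse_build_graph raw_mp start end_ → Spec_reverse_build_graph raw_mp start end_ (reverse_build_graph raw_mp start end_)

-- ===== LEMMAS AND PROOFS =====

-- measure: total length of the neighbour lists of the not-yet-visited keys
def pvS (raw_mp : List (Int × List Int)) (visited : PySem.Set Int) : Nat :=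
  ((raw_mp.filter (fun p => !(PySem.Set.contains visited p.1))).map (fun p => p.2.length)).sum

lemma pvS_cons (p : Int × List Int) (rest : List (Int × List Int)) (v : PySem.Set Int) :
    pvS (p :: rest) v
      = (if PySem.Set.contains v p.1 then 0 else p.2.length) + pvS rest v := by
  by_cases hm : p.1 ∈ v <;>
    simp [pvS, List.filter_cons, PySem.Set.contains_eq_decide, hm]

lemma c1 (s : PySem.Set Int) (x y : Int) (h : PySem.Set.contains s y = true) :
    PySem.Set.contains (PySem.Set.add s x) y = true := by
  simp [PySem.Set.add] at *; split <;> simp [h]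

lemma c2 (s : PySem.Set Int) (x : Int) :
    PySem.Set.contains (PySem.Set.add s x) x = true := by
  simp [PySem.Set.add]; split <;> simp_all

lemma pvS_add_le (raw_mp : List (Int × List Int)) (visited : PySem.Set Int) (node : Int) :
    pvS raw_mp (PySem.Set.add visited node) ≤ pvS raw_mp visited := by
  induction raw_mp with
  | nil => simp [pvS]
  | cons p rest ih =>
    rw [pvS_cons, pvS_cons]
    by_cases h : PySem.Set.contains visited p.1 = true
    · rw [h, c1 visited node p.1 h]; omega
    · rw [Bool.eq_false_iff.mpr h]
      by_cases h2 : PySem.Set.contains (PySem.Set.add visited node) p.1 = true <;>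
        [rw [h2]; rw [Bool.eq_false_iff.mpr h2]] <;> simp <;> omega

lemma pvS_add_lt (raw_mp : List (Int × List Int)) (visited : PySem.Set Int) (node : Int)
    (l : List Int) (hmem : (node, l) ∈ raw_mp)
    (hvis : PySem.Set.contains visited node = false) :
    pvS raw_mp (PySem.Set.add visited node) + l.length ≤ pvS raw_mp visited := by
  induction raw_mp with
  | nil => simp at hmem
  | cons p rest ih =>
    have hle := pvS_add_le rest visited node
    rw [pvS_cons, pvS_cons]
    rcases List.mem_cons.mp hmem with h | h
    · have hp1 : p.1 = node := by rw [← h]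
      have hp2 : p.2 = l := by rw [← h]
      rw [hp1, hp2, c2, hvis]; simp; omega
    · have hih := ih h
      by_cases hc : PySem.Set.contains visited p.1 = true
      · rw [hc, c1 visited node p.1 hc]; omega
      · rw [Bool.eq_false_iff.mpr hc]
        by_cases h2 : PySem.Set.contains (PySem.Set.add visited node) p.1 = true <;>
          [rw [h2]; rw [Bool.eq_false_iff.mpr h2]] <;> simp <;> omega

lemma mem_of_get?_mk (raw_mp : List (Int × List Int)) (node : Int) (l : List Int)
    (h : (PySem.Dict.mk raw_mp).get? node = some l) : (node, l) ∈ raw_mp := by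
  induction raw_mp with
  | nil => simp [PySem.Dict.get?] at h
  | cons p rest ih =>
    rw [show (p :: rest) = ((p.1, p.2) :: rest) by simp, PySem.Dict.get?_mk_cons] at h
    by_cases hk : p.1 = node
    · simp [hk] at h
      have hp : p = (node, l) := Prod.ext hk h
      rw [← hp]
      exact List.mem_cons_self
    · simp [hk] at h; right; exact ih h

-- A's inner for-loop, once the first neighbour has created the entry, keeps appending to it
lemma stepA_go (node : Int) (ns : List Int) :
    ∀ (acc : List Int) (d : PySem.Dict Int (List Int)) (q : List Int),
      d.contains node = false →
      ns.foldl (stepA node) (d.insert node acc, q) = (d.insert node (acc ++ ns), q ++ ns) := by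
  induction ns with
  | nil => intro acc d q _; simp
  | cons n ns ih =>
    intro acc d q h
    have h1 : (d.insert node acc).contains node = true := PySem.Dict.contains_insert_self d node acc
    simp only [List.foldl_cons, stepA, h1, if_pos, PySem.Dict.modify,
      PySem.Dict.getD_insert_self, PySem.Dict.insert_insert_self]
    rw [ih (acc ++ [n]) d (q ++ [n]) h]
    simp

-- net effect of A's whole inner loop on a fresh key
lemma stepA_foldl (node : Int) (n : Int) (ns : List Int) (d : PySem.Dict Int (List Int))
    (q : List Int) (h : d.contains node = false) :
    (n :: ns).foldl (stepA node) (d, q) = (d.insert node (n :: ns), q ++ (n :: ns)) := by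
  simp only [List.foldl_cons, stepA, h, if_neg, Bool.false_eq_true, not_false_iff]
  rw [stepA_go node ns [n] d (q ++ [n]) h]
  simp

lemma pvPairs_append (raw_mp : List (Int × List Int)) (keys : List Int) (node : Int) :
    pvPairs raw_mp (keys ++ [node])
      = pvPairs raw_mp keys ++ [(node, ((PySem.Dict.mk raw_mp).get? node).getD [])] := by
  simp [pvPairs]

-- d never holds a key the visited set lacks
lemma dict_fresh (raw_mp : List (Int × List Int)) (visited : PySem.Set Int)
    (keys : List Int) (d : PySem.Dict Int (List Int)) (node : Int)
    (hd : d.items = pvPairs raw_mp keys)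
    (hv : ∀ n ∈ keys, PySem.Set.contains visited n = true)
    (hvis : PySem.Set.contains visited node = false) :
    d.contains node = false := by
  by_contra hcon
  have hcon' : d.contains node = true := by
    cases hb : d.contains node
    · exact absurd hb hcon
    · rfl
  have hkmem : node ∈ d.keys := (PySem.Dict.contains_iff_mem_keys d node).mp hcon'
  have hkeys : d.keys = keys := by
    simp [PySem.Dict.keys, hd, pvPairs, List.map_map, Function.comp_def]
  rw [hkeys] at hkmem
  rw [hv node hkmem] at hvis
  exact Bool.noConfusion hvis

-- tail of one level of B: fold result fed to the recursive call (defeq to levelsB's body)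
def pvFinish (raw_mp : List (Int × List Int)) (fB : Nat)
    (st : PySem.Set Int × List Int × List Int) : List Int :=
  if st.2.2 = [] then st.2.1 else st.2.1 ++ levelsB raw_mp fB st.2.2 st.1

lemma levelsB_succ (raw_mp : List (Int × List Int)) (fB : Nat) (frontier : List Int)
    (seen : PySem.Set Int) :
    levelsB raw_mp (fB + 1) frontier seen
      = pvFinish raw_mp fB (frontier.foldl (stepB raw_mp) (seen, [], [])) := rfl

-- one level of the simulation: A's queue (= rest-of-level ++ nxt-so-far) tracks B's fold
lemma bridge (raw_mp : List (Int × List Int)) (fB' : Nat)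
    (IH : ∀ (visited : PySem.Set Int) (frontier keysG : List Int)
        (d : PySem.Dict Int (List Int)) (fA : Nat),
      d.items = pvPairs raw_mp keysG →
      (∀ n ∈ keysG, PySem.Set.contains visited n = true) →
      frontier.length + pvS raw_mp visited ≤ fA →
      pvS raw_mp visited + 1 ≤ fB' →
      (revLoopA raw_mp fA visited frontier d).items
        = pvPairs raw_mp (keysG ++ levelsB raw_mp fB' frontier visited)) :
    ∀ (level : List Int) (visited : PySem.Set Int) (carry keysG keysL : List Int)
      (d : PySem.Dict Int (List Int)) (fA : Nat),
      d.items = pvPairs raw_mp (keysG ++ keysL) →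
      (∀ n ∈ keysG ++ keysL, PySem.Set.contains visited n = true) →
      level.length + carry.length + pvS raw_mp visited ≤ fA →
      pvS raw_mp visited + (if carry = [] then 0 else 1) ≤ fB' →
      (revLoopA raw_mp fA visited (level ++ carry) d).items
        = pvPairs raw_mp (keysG ++
            pvFinish raw_mp fB' (level.foldl (stepB raw_mp) (visited, keysL, carry))) := by
  intro level
  induction level with
  | nil =>
    intro visited carry keysG keysL d fA hd hv hfA hfB
    simp only [List.nil_append, List.foldl_nil, pvFinish]
    by_cases hc : carry = []
    · subst hc
      rw [if_pos rfl]
      cases fA <;> simp [revLoopA, hd]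
    · rw [if_neg hc]
      have := IH visited carry (keysG ++ keysL) d fA hd hv
        (by simp at hfA; omega)
        (by rw [if_neg hc] at hfB; omega)
      rw [this, List.append_assoc]
  | cons node lvl ihl =>
    intro visited carry keysG keysL d fA hd hv hfA hfB
    obtain ⟨fA', rfl⟩ : ∃ k, fA = k + 1 :=
      ⟨fA - 1, by simp [List.length_cons] at hfA; omega⟩
    simp only [List.cons_append, List.foldl_cons]
    by_cases hvisn : PySem.Set.contains visited node = true
    · have hmem : node ∈ visited := by
        simpa [PySem.Set.contains_eq_decide] using hvisn
      have hstep : stepB raw_mp (visited, keysL, carry) node = (visited, keysL, carry) := by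
        simp [stepB, hvisn, hmem]
      rw [hstep]
      have hA : revLoopA raw_mp (fA' + 1) visited (node :: (lvl ++ carry)) d
          = revLoopA raw_mp fA' visited (lvl ++ carry) d := by
        simp [revLoopA, hvisn, hmem]
      rw [hA]
      exact ihl visited carry keysG keysL d fA' hd hv
        (by simp [List.length_cons] at hfA ⊢; omega) hfB
    · have hvis' : PySem.Set.contains visited node = false := Bool.eq_false_iff.mpr hvisn
      have hnmem : node ∉ visited := by
        simpa [PySem.Set.contains_eq_decide] using hvis'
      have hv' : ∀ n ∈ keysG ++ keysL,
          PySem.Set.contains (PySem.Set.add visited node) n = true :=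
        fun n hn => c1 visited node n (hv n hn)
      cases hget : (PySem.Dict.mk raw_mp).get? node with
      | none =>
        have hstep : stepB raw_mp (visited, keysL, carry) node
            = (PySem.Set.add visited node, keysL, carry) := by
          simp [stepB, hvis', hnmem, hget]
        rw [hstep]
        have hA : revLoopA raw_mp (fA' + 1) visited (node :: (lvl ++ carry)) d
            = revLoopA raw_mp fA' (PySem.Set.add visited node) (lvl ++ carry) d := by
          simp [revLoopA, hvis', hnmem, hget]
        rw [hA]
        have hle := pvS_add_le raw_mp visited node
        exact ihl (PySem.Set.add visited node) carry keysG keysL d fA' hd hv'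
          (by simp [List.length_cons] at hfA ⊢; omega)
          (by by_cases hc : carry = [] <;> simp [hc] at hfB ⊢ <;> omega)
      | some ns =>
        cases ns with
        | nil =>
          have hstep : stepB raw_mp (visited, keysL, carry) node
              = (PySem.Set.add visited node, keysL, carry) := by
            simp [stepB, hvis', hnmem, hget]
          rw [hstep]
          have hA : revLoopA raw_mp (fA' + 1) visited (node :: (lvl ++ carry)) d
              = revLoopA raw_mp fA' (PySem.Set.add visited node) (lvl ++ carry) d := by
            simp [revLoopA, hvis', hnmem, hget]
          rw [hA]
          have hle := pvS_add_le raw_mp visited node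
          exact ihl (PySem.Set.add visited node) carry keysG keysL d fA' hd hv'
            (by simp [List.length_cons] at hfA ⊢; omega)
            (by by_cases hc : carry = [] <;> simp [hc] at hfB ⊢ <;> omega)
        | cons n ns =>
          have hdcon : d.contains node = false :=
            dict_fresh raw_mp visited (keysG ++ keysL) d node hd hv hvis'
          have hstep : stepB raw_mp (visited, keysL, carry) node
              = (PySem.Set.add visited node, keysL ++ [node], carry ++ (n :: ns)) := by
            simp [stepB, hvis', hnmem, hget]
          rw [hstep]
          have hA : revLoopA raw_mp (fA' + 1) visited (node :: (lvl ++ carry)) d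
              = revLoopA raw_mp fA' (PySem.Set.add visited node)
                  (lvl ++ (carry ++ (n :: ns))) (d.insert node (n :: ns)) := by
            simp only [revLoopA, hvis', hnmem, Bool.false_eq_true, if_neg, not_false_iff, hget]
            rw [stepA_foldl node n ns d (lvl ++ carry) hdcon]
            simp [List.append_assoc]
          rw [hA]
          have hitems : (d.insert node (n :: ns)).items
              = pvPairs raw_mp (keysG ++ (keysL ++ [node])) := by
            rw [PySem.Dict.items_insert_of_not_contains d (n :: ns) hdcon,
              ← List.append_assoc, pvPairs_append, hd, hget]
            rfl
          have hvnew : ∀ m ∈ keysG ++ (keysL ++ [node]),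
              PySem.Set.contains (PySem.Set.add visited node) m = true := by
            intro m hm
            rcases List.mem_append.mp hm with hm | hm
            · exact hv' m (List.mem_append.mpr (Or.inl hm))
            · rcases List.mem_append.mp hm with hm | hm
              · exact hv' m (List.mem_append.mpr (Or.inr hm))
              · have hmn : m = node := by simpa using hm
                rw [hmn]
                exact c2 visited node
          have hlt := pvS_add_lt raw_mp visited node (n :: ns)
            (mem_of_get?_mk raw_mp node (n :: ns) hget) hvis'
          have hSle : pvS raw_mp visited ≤ fB' := by
            by_cases hc : carry = [] <;> simp [hc] at hfB <;> omega
          exact ihl (PySem.Set.add visited node) (carry ++ (n :: ns)) keysG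
            (keysL ++ [node]) (d.insert node (n :: ns)) fA' hitems hvnew
            (by simp only [List.length_cons, List.length_append] at hfA hlt ⊢; omega)
            (by rw [if_neg (by simp)]
                simp only [List.length_cons] at hlt
                omega)

-- the main simulation, by induction on B's level fuel
lemma loopAB (raw_mp : List (Int × List Int)) :
    ∀ (fB : Nat) (visited : PySem.Set Int) (frontier keysG : List Int)
      (d : PySem.Dict Int (List Int)) (fA : Nat),
      d.items = pvPairs raw_mp keysG →
      (∀ n ∈ keysG, PySem.Set.contains visited n = true) →
      frontier.length + pvS raw_mp visited ≤ fA →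
      pvS raw_mp visited + 1 ≤ fB →
      (revLoopA raw_mp fA visited frontier d).items
        = pvPairs raw_mp (keysG ++ levelsB raw_mp fB frontier visited) := by
  intro fB
  induction fB with
  | zero => intro _ _ _ _ _ _ _ _ hfB; omega
  | succ fB ih =>
    intro visited frontier keysG d fA hd hv hfA hfB
    rw [levelsB_succ]
    have h := bridge raw_mp fB ih frontier visited [] keysG [] d fA
      (by simpa using hd) (by simpa using hv) (by simpa using hfA)
      (by simp; omega)
    simpa using h

lemma pvS_empty_le (raw_mp : List (Int × List Int)) :
    pvS raw_mp PySem.Set.empty + 1 ≤ pvFuel raw_mp := by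
  have key : ∀ (l : List (Int × List Int)) (a : Nat),
      l.foldl (fun a p => a + p.2.length) a = a + (l.map (fun p => p.2.length)).sum := by
    intro l
    induction l with
    | nil => simp
    | cons p rest ih => intro a; simp [ih]; omega
  simp [pvS, pvFuel, PySem.Set.empty, PySem.Set.contains, key]

-- ===== VERDICT (by name: the statement is the Claim_ definition above) =====
theorem reverse_build_graph_spec : Claim_equal_reverse_build_graph := by
  intro raw_mp start end_ _
  unfold Spec_reverse_build_graph reverse_build_graph reverse_build_graph_alt
  refine loopAB raw_mp (pvFuel raw_mp) PySem.Set.empty [end_] [] PySem.Dict.empty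
    (pvFuel raw_mp) rfl (by intro n hn; cases hn) ?_ (pvS_empty_le raw_mp)
  have := pvS_empty_le raw_mp
  simp only [List.length_cons, List.length_nil]
  omega
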